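-- pv_equiv track=rewrite | github.com/Aquillot/Othello | src/GameController.py | create_weights
-- ===== SOURCE A (Python) =====
-- def create_weights(size):
--     """
--     Calcule dynamiquement la grille de poids pour un plateau de taille 'size'.
--     Pour un 8x8, on obtient par exemple :
--        [100, -20, 10,  5,  5, 10, -20, 100],
--        [-20, -50, -2, -2, -2, -2, -50, -20],
--        [10,  -2,  -1, -1, -1, -1,  -2,  10],
--        [5,   -2,  -1, -1, -1, -1,  -2,   5],
--        [5,   -2,  -1, -1, -1, -1,  -2,   5],
--        [10,  -2,  -1, -1, -1, -1,  -2,  10],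
--        [-20, -50, -2, -2, -2, -2, -50, -20],
--        [100, -20, 10,  5,  5, 10, -20, 100]
--     Pour un plateau 4x4, nous pourrions avoir :
--         [100, -20, -20, 100],
--         [-20, -50, -50, -20],
--         [-20, -50, -50, -20],
--         [100, -20, -20, 100]
--     (Les règles appliquées ici peuvent être ajustées en fonction des tests.)
--     """
--     weights = []
--     for i in range(size):
--         mirror_r = min(i, size - 1 - i)
--         row = []
--         for j in range(size):
--             mirror_c = min(j, size - 1 - j)
--
--             if mirror_r == 0:
--                 w = {0: 100, 1: -20, 2: 10}.get(mirror_c, 5)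
--             elif mirror_r == 1:
--                 w = {0: -20, 1: -50}.get(mirror_c, -2)
--             else:
--                 w = 10 if mirror_r == 2 and mirror_c == 0 else -2 if mirror_c == 1 else -1 if mirror_c >= 2 else 5
--
--             row.append(w)
--         weights.append(row)
--     return weights
-- ===== SOURCE B (Python) =====
-- def _weight(i, j):
--     a, b = (i, j) if i <= j else (j, i)
--     if a == 0:
--         return 100 if b == 0 else -20 if b == 1 else 10 if b == 2 else 5
--     if a == 1:
--         return -50 if b == 1 else -2
--     return -1
--
--
-- def create_weights(size):
--     half = (size + 1) // 2
--     top = []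
--     for i in range(half):
--         left = [_weight(i, j) for j in range(half)]
--         top.append(left + left[:size - half][::-1])
--     return top + top[:size - half][::-1]
-- ===== Notes on version B (the rewrite author's own statement) =====
-- stated objective: faster
-- what changed: B computes each weight once from the top-left quadrant's (i,j) pair (sorted, no per-cell min/mirror arithmetic or dict lookups) and builds the full grid by mirroring the row prefix and the top block of rows, instead of A's full size*size double loop that recomputes mirror indices and does a dict .get per cell.
import Mathlib
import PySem

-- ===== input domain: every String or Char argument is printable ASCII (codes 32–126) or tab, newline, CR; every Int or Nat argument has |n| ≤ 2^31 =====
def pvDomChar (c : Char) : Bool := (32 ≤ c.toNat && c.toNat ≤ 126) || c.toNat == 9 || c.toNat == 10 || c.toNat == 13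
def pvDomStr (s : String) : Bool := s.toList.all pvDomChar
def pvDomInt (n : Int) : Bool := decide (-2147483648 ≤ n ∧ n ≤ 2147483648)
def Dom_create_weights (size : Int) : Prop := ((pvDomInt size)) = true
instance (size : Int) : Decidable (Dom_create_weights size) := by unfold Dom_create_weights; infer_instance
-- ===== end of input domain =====

-- B builds only the top-left quadrant of weights and obtains the full grid by mirroring
-- rows and row-prefixes (the grid is symmetric), instead of recomputing min-mirrors per cell:
-- measurably faster by a constant factor; same O(size^2) output.

-- ===== PORT A =====
-- per-cell weight of A's inner loop body (A computes mirror_r once per row; recomputing it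
-- per cell is the same value)
def pvCellA (size i j : Int) : Int :=
  let mirror_r := min i (size - 1 - i)
  let mirror_c := min j (size - 1 - j)
  if mirror_r = 0 then
    ((((PySem.Dict.empty).insert 0 100).insert 1 (-20)).insert 2 10).getD mirror_c 5
  else if mirror_r = 1 then
    (((PySem.Dict.empty).insert 0 (-20)).insert 1 (-50)).getD mirror_c (-2)
  else
    if mirror_r = 2 ∧ mirror_c = 0 then 10
    else if mirror_c = 1 then -2
    else if 2 ≤ mirror_c then -1 else 5

def create_weights (size : Int) : List (List Int) :=
  (PySem.List.pyRange 0 size).foldl (fun weights i =>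
    let row := (PySem.List.pyRange 0 size).foldl (fun row j => row ++ [pvCellA size i j]) []
    weights ++ [row]) []

-- ===== PORT B =====
def pvWeightB (i j : Int) : Int :=
  let p := if i ≤ j then (i, j) else (j, i)
  if p.1 = 0 then
    if p.2 = 0 then 100 else if p.2 = 1 then -20 else if p.2 = 2 then 10 else 5
  else if p.1 = 1 then
    if p.2 = 1 then -50 else -2
  else -1

def create_weights_alt (size : Int) : List (List Int) :=
  let half := PySem.Int.floordiv (size + 1) 2
  let top := (PySem.List.pyRange 0 half).foldl (fun top i =>
    let left := (PySem.List.pyRange 0 half).map (fun j => pvWeightB i j)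
    top ++ [left ++ (PySem.List.slice left none (some (size - half))).reverse]) []
  top ++ (PySem.List.slice top none (some (size - half))).reverse

-- ===== PRECONDITION & SPEC =====
def Spec_create_weights (size : Int) (out : List (List Int)) : Prop := out = create_weights_alt size
instance (size : Int) (out : List (List Int)) : Decidable (Spec_create_weights size out) := by unfold Spec_create_weights; infer_instance

-- ===== CLAIM (what is proved, stated in full; the proofs are below) =====
def Claim_equal_create_weights : Prop := ∀ (size : Int), Dom_create_weights size → Spec_create_weights size (create_weights size)

-- ===== LEMMAS AND PROOFS =====

-- proof-side names for B's quadrant structure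
def pvLeft (n i : Nat) : List Int := (List.range ((n + 1) / 2)).map (fun j : ℕ => pvWeightB i j)
def pvRowB (n i : Nat) : List Int := pvLeft n i ++ ((pvLeft n i).take (n / 2)).reverse
def pvTop (n : Nat) : List (List Int) := (List.range ((n + 1) / 2)).map (pvRowB n)

lemma slice_take {α : Type} (xs : List α) (m : Nat) :
    PySem.List.slice xs none (some (m : Int)) = xs.take m := by
  rw [PySem.List.slice_to xs (Int.natCast_nonneg m), Int.toNat_natCast]

-- A's cell weight depends on i only through min i (size-1-i): rows mirror.
lemma pvCellA_mirror_row (size i j : Int) : pvCellA size (size - 1 - i) j = pvCellA size i j := by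
  have h : size - 1 - (size - 1 - i) = i := by ring
  simp only [pvCellA, h, min_comm (size - 1 - i) i]

-- ... and on j only through min j (size-1-j): columns mirror.
lemma pvCellA_mirror_col (size i j : Int) : pvCellA size i (size - 1 - j) = pvCellA size i j := by
  have h : size - 1 - (size - 1 - j) = j := by ring
  simp only [pvCellA, h, min_comm (size - 1 - j) j]

-- in the top-left quadrant the mirrors are the identity, and B's sorted-pair weight agrees with A's cell weight
lemma pvWeightB_eq_cellA (size i j : Int) (hi : 0 ≤ i) (hj : 0 ≤ j)
    (hi2 : 2 * i ≤ size - 1) (hj2 : 2 * j ≤ size - 1) :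
    pvWeightB i j = pvCellA size i j := by
  have h1 : min i (size - 1 - i) = i := by omega
  have h2 : min j (size - 1 - j) = j := by omega
  simp only [pvCellA, h1, h2, pvWeightB, PySem.Dict.getD_insert]
  by_cases hij : i ≤ j <;> split_ifs <;> simp_all [PySem.Dict.getD] <;> omega

-- the characterizations of the two ports as maps over List.range
lemma create_weights_eq_map (n : Nat) :
    create_weights (n : Int) =
      (List.range n).map (fun i : ℕ => (List.range n).map (fun j : ℕ => pvCellA (n : Int) i j)) := by
  unfold create_weights
  rw [PySem.List.pyRange_zero_natCast, PySem.List.foldl_append_singleton_eq_map,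
    List.nil_append, List.map_map]
  apply List.map_congr_left
  intro i _
  simp only [Function.comp]
  rw [PySem.List.foldl_append_singleton_eq_map, List.nil_append, List.map_map]
  rfl

lemma create_weights_alt_eq_map (n : Nat) :
    create_weights_alt (n : Int) = pvTop n ++ ((pvTop n).take (n / 2)).reverse := by
  have hh : PySem.Int.floordiv ((n : Int) + 1) 2 = (((n + 1) / 2 : Nat) : Int) := by
    have h := PySem.Int.floordiv_natCast (n + 1) 2
    push_cast at h
    exact h
  have hk : (n : Int) - (((n + 1) / 2 : Nat) : Int) = ((n / 2 : Nat) : Int) := by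
    push_cast
    omega
  unfold create_weights_alt
  simp only [hh, hk, slice_take]
  rw [PySem.List.pyRange_zero_natCast, PySem.List.foldl_append_singleton_eq_map,
    List.nil_append, List.map_map]
  have htop : ∀ (i : ℕ),
      ((fun i : Int =>
        (List.map (fun j => pvWeightB i j) (List.map (fun k : ℕ => (k : Int)) (List.range ((n + 1) / 2)))) ++
          ((List.map (fun j => pvWeightB i j) (List.map (fun k : ℕ => (k : Int)) (List.range ((n + 1) / 2)))).take (n / 2)).reverse)
        ∘ (fun k : ℕ => (k : Int))) i = pvRowB n i := by
    intro i
    simp only [Function.comp, List.map_map, pvRowB, pvLeft]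
    rfl
  rw [List.map_congr_left (fun i _ => htop i)]
  rfl

-- one full row of A equals B's quadrant row (left half + mirrored prefix), for a row index in the top half
lemma row_eq (n : Nat) (i : Nat) (hi : i < (n + 1) / 2) :
    (List.range n).map (fun j : ℕ => pvCellA (n : Int) i j) = pvRowB n i := by
  set h := (n + 1) / 2 with hh
  set k := n / 2 with hk
  have hhk : h + k = n := by omega
  have hkh : k ≤ h := by omega
  apply List.ext_getElem
  · simp [pvRowB, pvLeft, List.length_take]
    omega
  · intro j hj1 hj2
    simp only [List.getElem_map, List.getElem_range, pvRowB, pvLeft]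
    simp only [List.length_range, List.length_map] at hj1
    by_cases hjh : j < h
    · rw [List.getElem_append_left (by simp [List.length_map]; omega)]
      simp only [List.getElem_map, List.getElem_range]
      exact (pvWeightB_eq_cellA (n : Int) (i : Int) (j : Int)
        (by positivity) (by positivity) (by omega) (by omega)).symm
    · rw [List.getElem_append_right (by simp [List.length_map]; omega)]
      rw [List.getElem_reverse, List.getElem_take]
      simp only [List.getElem_map, List.getElem_range, List.length_map, List.length_take,
        List.length_range]
      have hlen : (min k h) - 1 - (j - h) = n - 1 - j := by omega
      rw [hlen]
      have hmirror : ((n - 1 - j : Nat) : Int) = (n : Int) - 1 - (j : Int) := by omega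
      rw [hmirror,
        pvWeightB_eq_cellA (n : Int) (i : Int) ((n : Int) - 1 - (j : Int))
          (by positivity) (by omega) (by omega) (by omega),
        pvCellA_mirror_col]

-- ===== VERDICT (by name: the statement is the Claim_ definition above) =====
theorem create_weights_spec : Claim_equal_create_weights := by
  intro size _
  unfold Spec_create_weights
  by_cases hle : size ≤ 0
  · -- empty board: both programs return []
    have h1 : PySem.List.pyRange 0 size = [] := by
      simp [PySem.List.pyRange]; omega
    have h2 : PySem.List.pyRange 0 (PySem.Int.floordiv (size + 1) 2) = [] := by
      have h3 := PySem.Int.floordiv_mul_add_mod (size + 1) 2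
      have h4 := PySem.Int.mod_nonneg (size + 1) (b := 2) (by norm_num)
      have h5 := PySem.Int.mod_lt (size + 1) (b := 2) (by norm_num)
      simp [PySem.List.pyRange]; omega
    simp only [create_weights, create_weights_alt]
    rw [h1, h2]
    simp [PySem.List.slice]
  · have hpos : 0 < size := by omega
    obtain ⟨n, rfl⟩ : ∃ m : ℕ, size = (m : Int) :=
      ⟨size.toNat, (Int.toNat_of_nonneg hpos.le).symm⟩
    rw [create_weights_eq_map, create_weights_alt_eq_map]
    set h := (n + 1) / 2 with hh
    set k := n / 2 with hk
    have hhk : h + k = n := by omega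
    have hkh : k ≤ h := by omega
    apply List.ext_getElem
    · simp [pvTop, List.length_take]
      omega
    · intro i hi1 hi2
      simp only [List.getElem_map, List.getElem_range, pvTop]
      simp only [List.length_range, List.length_map] at hi1
      by_cases hih : i < h
      · rw [List.getElem_append_left (by simp [List.length_map]; omega)]
        simp only [List.getElem_map, List.getElem_range]
        exact row_eq n i hih
      · rw [List.getElem_append_right (by simp [List.length_map]; omega)]
        rw [List.getElem_reverse, List.getElem_take]
        simp only [List.getElem_map, List.getElem_range, List.length_map,
          List.length_take, List.length_range]
        have hlen : (min k h) - 1 - (i - h) = n - 1 - i := by omega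
        rw [hlen]
        have hm : n - 1 - i < h := by omega
        rw [← row_eq n (n - 1 - i) hm]
        apply List.map_congr_left
        intro j _
        have hcast : ((n - 1 - i : Nat) : Int) = (n : Int) - 1 - (i : Int) := by omega
        rw [hcast, pvCellA_mirror_row]
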